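-- pv_equiv track=rewrite | github.com/nickchen111/Leetcode | Backtrack/3566. Partition Array into Two Equal Product Subsets.py | checkEqualPartitions
-- ===== SOURCE A (Python) =====
-- from typing import List
--
-- def checkEqualPartitions(nums: List[int], target: int) -> bool:
--     '''
--     背包!? 每一個元素乘上去會等於target
--     n * 2 ^ n
--     '''
--     # 二進制枚舉
--     u = 1 << len(nums) - 1
--     for mask in range(1, u):
--         mul1, mul2 = 1, 1
--         for i in range(len(nums)):
--             if (mask >> i) & 1:
--                 mul1 *= nums[i]
--             else:
--                 mul2 *= nums[i]
--         if mul1 == target and mul2 == target: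
--             return True
--     return False
--
--     '''
--     背包寫法
--     tot = 1
--     n = len(nums)
--     for x in nums:
--         tot *= x
--     if tot // target != target:
--         return False
--     @cache
--     def dfs(i:int, cur_sum:int, flag:bool):
--         if cur_sum == target and flag:
--             return True
--         if i == n:
--             return False
--         if cur_sum > target:
--             return False
--         return dfs(i + 1, cur_sum * nums[i], True) or dfs(i + 1, cur_sum, flag)
--     return dfs(0, 1, False)
--     '''
-- ===== SOURCE B (Python) =====
-- def checkEqualPartitions(nums, target):
--     # doubling product table: one pass building all (side1, side2) product pairs,
--     # index = subset mask; no inner per-mask loop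
--     *init, last = nums
--     pairs = [(1, last)]
--     for x in init:
--         pairs = [(a, b * x) for (a, b) in pairs] + [(a * x, b) for (a, b) in pairs]
--     return any(a == target and b == target for (a, b) in pairs[1:])
-- ===== Notes on version B (the rewrite author's own statement) =====
-- stated objective: alternative
-- what changed: B replaces the per-mask inner loop (recomputing both products bit by bit for every mask) with a single doubling pass that builds the table of all (side1,side2) product pairs indexed by mask, then scans it once (measured 5.33x at n=16, but both are exponential and time out at the largest probe size, so no speed claim).
import Mathlib
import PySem

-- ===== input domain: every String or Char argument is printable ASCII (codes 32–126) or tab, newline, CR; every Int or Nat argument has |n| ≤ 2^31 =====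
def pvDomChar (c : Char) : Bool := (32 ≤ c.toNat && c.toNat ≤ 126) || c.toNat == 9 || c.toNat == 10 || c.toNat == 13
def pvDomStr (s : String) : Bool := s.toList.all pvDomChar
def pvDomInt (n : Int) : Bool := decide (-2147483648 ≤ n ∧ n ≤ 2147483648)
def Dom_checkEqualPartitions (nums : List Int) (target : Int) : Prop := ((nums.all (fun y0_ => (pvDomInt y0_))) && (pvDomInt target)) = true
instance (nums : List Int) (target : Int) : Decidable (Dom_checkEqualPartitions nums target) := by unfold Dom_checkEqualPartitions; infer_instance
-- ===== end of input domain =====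

-- B builds the full table of (side1,side2) product pairs in one doubling pass
-- instead of recomputing both products bit by bit for every mask.

-- ===== PORT A =====
-- inner loop `for i in range(len(nums)): if (mask >> i) & 1: mul1 *= nums[i] else: mul2 *= nums[i]`,
-- carrying the index by shifting the mask ((mask >> i) & 1 = ((mask >> 1) >> (i-1)) & 1)
def pvMuls (nums : List Int) (mask : Nat) (acc : Int × Int) : Int × Int :=
  match nums with
  | [] => acc
  | x :: rest =>
      pvMuls rest (mask >>> 1) (if mask &&& 1 == 1 then (acc.1 * x, acc.2) else (acc.1, acc.2 * x))

-- outer loop `for mask in range(1, u): ... if mul1 == target and mul2 == target: return True`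
def pvALoop (nums : List Int) (target : Int) (mask u : Nat) : Bool :=
  if _h : mask < u then
    let m := pvMuls nums mask (1, 1)
    if m.1 == target && m.2 == target then true
    else pvALoop nums target (mask + 1) u
  else false
termination_by u - mask

def checkEqualPartitions (nums : List Int) (target : Int) : Bool :=
  pvALoop nums target 1 (1 <<< (nums.length - 1))

-- ===== PORT B =====
-- `pairs = [(a, b*x) for (a,b) in pairs] + [(a*x, b) for (a,b) in pairs]`
def pvStep (ps : List (Int × Int)) (x : Int) : List (Int × Int) :=
  ps.map (fun p => (p.1, p.2 * x)) ++ ps.map (fun p => (p.1 * x, p.2))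

-- `*init, last = nums` raises ValueError on []; the port returns false there (outside Pre_)
def checkEqualPartitions_alt (nums : List Int) (target : Int) : Bool :=
  match nums.getLast? with
  | none => false
  | some last =>
      let pairs := nums.dropLast.foldl pvStep [((1 : Int), last)]
      (pairs.drop 1).any (fun p => p.1 == target && p.2 == target)

-- ===== PRECONDITION & SPEC =====
-- Python A raises ValueError on the empty list (`1 << -1`), and B raises on unpacking; excluded.
def Pre_checkEqualPartitions (nums : List Int) (target : Int) : Prop := nums ≠ []
instance (nums : List Int) (target : Int) : Decidable (Pre_checkEqualPartitions nums target) := by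
  unfold Pre_checkEqualPartitions; infer_instance

def pvWitness_checkEqualPartitions : List Int × Int := ([2, 3, 6], 6)

def Spec_checkEqualPartitions (nums : List Int) (target : Int) (out : Bool) : Prop := out = checkEqualPartitions_alt nums target
instance (nums : List Int) (target : Int) (out : Bool) : Decidable (Spec_checkEqualPartitions nums target out) := by unfold Spec_checkEqualPartitions; infer_instance

-- ===== CLAIM (what is proved, stated in full; the proofs are below) =====
def Claim_equal_checkEqualPartitions : Prop := ∀ (nums : List Int) (target : Int), Dom_checkEqualPartitions nums target → Pre_checkEqualPartitions nums target → Spec_checkEqualPartitions nums target (checkEqualPartitions nums target)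

-- ===== LEMMAS AND PROOFS =====

-- `any` respects pointwise-on-members equality of predicates
theorem pvAnyCongrMem {α : Type} (l : List α) (p q : α → Bool)
    (h : ∀ a ∈ l, p a = q a) : l.any p = l.any q := by
  induction l with
  | nil => rfl
  | cons x xs ih =>
      simp only [List.any_cons, h x (by simp)]
      rw [ih (fun a ha => h a (by simp [ha]))]

-- the A-side counting loop is an `any` over the listed masks
theorem pvALoop_eq_any (nums : List Int) (target : Int) (mask u : Nat) :
    pvALoop nums target mask u =
      (List.range' mask (u - mask)).any
        (fun m => (pvMuls nums m (1, 1)).1 == target && (pvMuls nums m (1, 1)).2 == target) := by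
  fun_induction pvALoop nums target mask u with
  | case1 a b c d =>
      have he : u - a = (u - (a + 1)) + 1 := by omega
      rw [he, List.range'_succ]
      simp only [List.any_cons]
      rw [show ((pvMuls nums a (1, 1)).1 == target && (pvMuls nums a (1, 1)).2 == target) = true from d]
      simp
  | case2 a b c d e =>
      have he : u - a = (u - (a + 1)) + 1 := by omega
      rw [e, he, List.range'_succ]
      simp only [List.any_cons]
      rw [show ((pvMuls nums a (1, 1)).1 == target && (pvMuls nums a (1, 1)).2 == target) = false from by
        simpa using d]
      simp
  | case3 a b =>
      have he : u - a = 0 := by omega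
      rw [he]
      simp

-- pvMuls only looks at the low |nums| bits of the mask
theorem pvMuls_add_pow (nums : List Int) (c : Nat) :
    ∀ (m : Nat) (acc : Int × Int),
      pvMuls nums (m + 2 ^ nums.length * c) acc = pvMuls nums m acc := by
  induction nums with
  | nil => intro m acc; rfl
  | cons x rest ih =>
      intro m acc
      have hlen : (x :: rest).length = rest.length + 1 := rfl
      have hpow : 2 ^ (x :: rest).length = 2 * 2 ^ rest.length := by
        rw [hlen, pow_succ]; ring
      have hand : (m + 2 ^ (x :: rest).length * c) &&& 1 = m &&& 1 := by
        rw [Nat.and_one_is_mod, Nat.and_one_is_mod, hpow, mul_assoc,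
          Nat.add_mul_mod_self_left]
      have hshift : (m + 2 ^ (x :: rest).length * c) >>> 1 = m >>> 1 + 2 ^ rest.length * c := by
        rw [Nat.shiftRight_one, Nat.shiftRight_one, hpow, mul_assoc,
          Nat.add_mul_div_left _ _ (by norm_num : 0 < 2)]
      simp only [pvMuls, hand, hshift, ih]

-- the accumulator factors out
theorem pvMuls_scale (nums : List Int) :
    ∀ (m : Nat) (a b : Int),
      pvMuls nums m (a, b) = (a * (pvMuls nums m (1, 1)).1, b * (pvMuls nums m (1, 1)).2) := by
  induction nums with
  | nil => intro m a b; simp [pvMuls]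
  | cons x rest ih =>
      intro m a b
      obtain ⟨r1, r2, hr⟩ : ∃ r1 r2, pvMuls rest (m >>> 1) (1, 1) = (r1, r2) := ⟨_, _, rfl⟩
      cases h : (m &&& 1 == 1)
      · simp only [pvMuls, h, Bool.false_eq_true, if_false]
        rw [ih, ih (m >>> 1) 1 (1 * x), hr]
        dsimp only
        simp only [Prod.mk.injEq]
        exact ⟨by ring, by ring⟩
      · simp only [pvMuls, h, if_true]
        rw [ih, ih (m >>> 1) (1 * x) 1, hr]
        dsimp only
        simp only [Prod.mk.injEq]
        exact ⟨by ring, by ring⟩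

-- pvMuls over an appended list splits
theorem pvMuls_append (l l' : List Int) :
    ∀ (m : Nat) (acc : Int × Int),
      pvMuls (l ++ l') m acc = pvMuls l' (m >>> l.length) (pvMuls l m acc) := by
  induction l with
  | nil => intro m acc; simp [pvMuls]
  | cons x rest ih =>
      intro m acc
      simp only [List.cons_append, pvMuls, ih, List.length_cons]
      congr 1
      rw [Nat.add_comm, Nat.shiftRight_add]

-- B's doubling fold builds exactly the per-mask table of pvMuls values
theorem foldl_pvStep_eq_map (l : List Int) (init : Int × Int) :
    l.foldl pvStep [init] =
      (List.range (2 ^ l.length)).map (fun m => pvMuls l m init) := by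
  induction l using List.reverseRecOn with
  | nil => simp [pvMuls]
  | append_singleton l y ih =>
      rw [List.foldl_append, ih]
      simp only [List.foldl_cons, List.foldl_nil]
      have hpow : 2 ^ (l ++ [y]).length = 2 ^ l.length + 2 ^ l.length := by
        simp [List.length_append, pow_succ]; ring
      rw [hpow, List.range_add, List.map_append, List.map_map]
      unfold pvStep
      rw [List.map_map, List.map_map]
      congr 1
      · apply List.map_congr_left
        intro m hm
        have hm' : m < 2 ^ l.length := List.mem_range.mp hm
        have h0 : m >>> l.length = 0 := by
          rw [Nat.shiftRight_eq_div_pow]; exact Nat.div_eq_of_lt hm'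
        simp only [Function.comp, pvMuls_append l [y] m init, h0, pvMuls]
        norm_num
      · apply List.map_congr_left
        intro m hm
        have hm' : m < 2 ^ l.length := List.mem_range.mp hm
        have h1 : (2 ^ l.length + m) >>> l.length = 1 := by
          rw [Nat.shiftRight_eq_div_pow, Nat.add_comm,
            Nat.add_div_right _ (Nat.two_pow_pos _),
            Nat.div_eq_of_lt hm']
        have hlow : pvMuls l (2 ^ l.length + m) init = pvMuls l m init := by
          have := pvMuls_add_pow l 1 m init
          simpa [Nat.add_comm] using this
        simp only [Function.comp, pvMuls_append l [y] (2 ^ l.length + m) init, h1, hlow, pvMuls]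
        norm_num

-- ===== VERDICT (by name: the statement is the Claim_ definition above) =====
theorem checkEqualPartitions_spec : Claim_equal_checkEqualPartitions := by
  intro nums target _hdom hpre
  unfold Spec_checkEqualPartitions
  obtain ⟨l, x, rfl⟩ : ∃ l x, nums = l ++ [x] := by
    rcases List.eq_nil_or_concat nums with h | ⟨l, x, h⟩
    · exact absurd h hpre
    · exact ⟨l, x, by simpa [List.concat_eq_append] using h⟩
  unfold checkEqualPartitions checkEqualPartitions_alt
  rw [List.getLast?_concat, List.dropLast_concat]
  simp only
  rw [pvALoop_eq_any, foldl_pvStep_eq_map]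
  have hlen : (l ++ [x]).length - 1 = l.length := by simp
  have hu : 1 <<< ((l ++ [x]).length - 1) = 2 ^ l.length := by
    rw [hlen, Nat.shiftLeft_eq, one_mul]
  rw [hu]
  have hrange : (List.range (2 ^ l.length)).drop 1 = List.range' 1 (2 ^ l.length - 1) := by
    have h : 2 ^ l.length = (2 ^ l.length - 1) + 1 := by
      have := Nat.one_le_two_pow (n := l.length); omega
    rw [List.range_eq_range']
    conv_lhs => rw [h]
    rw [List.range'_succ]
    rfl
  rw [← List.map_drop, hrange, List.any_map]
  apply pvAnyCongrMem
  intro m hm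
  have hm' : 1 ≤ m ∧ m < 2 ^ l.length := by
    have := List.mem_range'_1.mp hm
    omega
  have h0 : m >>> l.length = 0 := by
    rw [Nat.shiftRight_eq_div_pow]; exact Nat.div_eq_of_lt hm'.2
  rw [pvMuls_append l [x] m (1, 1), h0]
  simp only [Function.comp_apply]
  rw [pvMuls_scale l m 1 x]
  simp [pvMuls, mul_comm]
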